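-- pv_equiv track=rewrite | github.com/hieunq95/my-rl | experiments/block_fl_dqn.py | to_scalar_state
-- ===== SOURCE A (Python) =====
-- def to_scalar_state(state):
--     s = 0
--     for i in range(len(state)):
--         if i < len(state):
--             s += state[i] * 4**(len(state) - i - 1)
--         else:
--             s += state[i]
--     return s
-- ===== SOURCE B (Python) =====
-- def to_scalar_state(state):
--     s = 0
--     for x in state:
--         s = s * 4 + x
--     return s
-- ===== Notes on version B (the rewrite author's own statement) =====
-- stated objective: faster
-- what changed: Replaced the index loop that recomputes 4**(n-i-1) for every position (and its dead else-branch) with a single left-to-right Horner pass s = s*4 + x.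
import Mathlib
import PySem

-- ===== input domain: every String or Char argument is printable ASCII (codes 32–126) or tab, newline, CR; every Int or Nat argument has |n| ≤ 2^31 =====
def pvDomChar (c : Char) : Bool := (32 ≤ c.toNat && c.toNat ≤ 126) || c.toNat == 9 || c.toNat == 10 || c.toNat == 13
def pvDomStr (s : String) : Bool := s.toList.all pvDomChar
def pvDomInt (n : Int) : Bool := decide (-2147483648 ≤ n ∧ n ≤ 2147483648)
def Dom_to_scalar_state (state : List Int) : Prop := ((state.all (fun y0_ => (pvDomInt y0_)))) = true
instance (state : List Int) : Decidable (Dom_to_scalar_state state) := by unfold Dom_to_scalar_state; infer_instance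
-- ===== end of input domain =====

-- B replaces A's per-index loop with repeated exponentiation 4**(n-i-1) by one Horner pass s = s*4 + x (faster: O(n) vs O(n^2)).

-- ===== PORT A =====
def to_scalar_state (state : List Int) : Int :=
  (PySem.List.pyRange 0 (PySem.List.len state) 1).foldl
    (fun s i =>
      if i < PySem.List.len state then
        s + PySem.List.pyGetD state i 0 * 4 ^ ((PySem.List.len state) - i - 1).toNat
      else
        s + PySem.List.pyGetD state i 0) 0

-- ===== PORT B =====
def to_scalar_state_alt (state : List Int) : Int :=
  state.foldl (fun s x => s * 4 + x) 0

-- ===== PRECONDITION & SPEC =====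
def Spec_to_scalar_state (state : List Int) (out : Int) : Prop := out = to_scalar_state_alt state
instance (state : List Int) (out : Int) : Decidable (Spec_to_scalar_state state out) := by unfold Spec_to_scalar_state; infer_instance

-- ===== CLAIM (what is proved, stated in full; the proofs are below) =====
def Claim_equal_to_scalar_state : Prop := ∀ (state : List Int), Dom_to_scalar_state state → Spec_to_scalar_state state (to_scalar_state state)

-- ===== LEMMAS AND PROOFS =====

/-- The positional value A computes, as a sum over `List.range`. -/
def pvVal (xs : List Int) : Int :=
  ((List.range xs.length).map (fun k => xs.getD k 0 * 4 ^ (xs.length - k - 1))).sum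

lemma to_scalar_state_eq_val (xs : List Int) : to_scalar_state xs = pvVal xs := by
  unfold to_scalar_state pvVal
  rw [show PySem.List.len xs = ((xs.length : Int)) from by simp [PySem.List.len_eq],
    PySem.List.pyRange_zero_nat, List.foldl_map]
  rw [PySem.List.foldl_congr_mem _ _
    (fun s k => s + xs.getD k 0 * 4 ^ (xs.length - k - 1)) 0 ?_]
  · rw [PySem.List.foldl_add]; ring
  · intro s k hk
    have hk' : k < xs.length := List.mem_range.mp hk
    rw [if_pos (by exact_mod_cast hk')]
    have h1 : ((xs.length : Int) - (k : Int) - 1).toNat = xs.length - k - 1 := by omega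
    simp [h1]

lemma pvVal_snoc (xs : List Int) (x : Int) : pvVal (xs ++ [x]) = pvVal xs * 4 + x := by
  unfold pvVal
  simp only [List.length_append, List.length_singleton, List.range_succ, List.map_append,
    List.sum_append, List.map_cons, List.map_nil, List.sum_cons, List.sum_nil]
  have hlast : (xs ++ [x]).getD xs.length 0 = x := by
    simp [List.getD]
  have hpow : xs.length + 1 - xs.length - 1 = 0 := by omega
  rw [hlast, hpow]
  have hmap : (List.range xs.length).map
      (fun k => (xs ++ [x]).getD k 0 * 4 ^ (xs.length + 1 - k - 1))
      = (List.range xs.length).map (fun k => xs.getD k 0 * 4 ^ (xs.length - k - 1) * 4) := by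
    apply List.map_congr_left
    intro k hk
    have hk' : k < xs.length := List.mem_range.mp hk
    have hg : (xs ++ [x]).getD k 0 = xs.getD k 0 := by
      simp [List.getD, List.getElem?_append_left hk']
    have he : xs.length + 1 - k - 1 = (xs.length - k - 1) + 1 := by omega
    rw [hg, he, pow_succ]; ring
  rw [hmap, List.sum_map_mul_right]
  ring

lemma alt_snoc (xs : List Int) (x : Int) :
    to_scalar_state_alt (xs ++ [x]) = to_scalar_state_alt xs * 4 + x := by
  simp [to_scalar_state_alt, List.foldl_append]

lemma val_eq_alt (xs : List Int) : pvVal xs = to_scalar_state_alt xs := by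
  induction xs using List.reverseRecOn with
  | nil => rfl
  | append_singleton ys y ih => rw [pvVal_snoc, alt_snoc, ih]

-- ===== VERDICT (by name: the statement is the Claim_ definition above) =====
theorem to_scalar_state_spec : Claim_equal_to_scalar_state := by
  intro state _
  unfold Spec_to_scalar_state
  rw [to_scalar_state_eq_val, val_eq_alt]
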